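-- pv_equiv track=rewrite | github.com/NeckRomancer015/AOC | 2023/Day12/day12v3.py | combo1
-- ===== SOURCE A (Python) =====
-- def combo1(row, numbers):
--     i=0
--     hash = []
--     for r in row:
--         if r =='.':
--             if i>0:
--                 hash.append(i)
--             i=0
--         elif r=='#':
--             i+=1
--         else:
--             assert False
--     if i>0:
--         hash.append(i)
--     if numbers== hash:
--         return True
--     else:
--         return False
-- ===== SOURCE B (Python) =====
-- def combo1(row, numbers):
--     # Match `numbers` against the row in lockstep: skip a dot gap, measure one
--     # '#' run, compare it with the next expected number; fail fast on mismatch.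
--     L = len(row)
--     i = 0
--     k = 0
--     while True:
--         while i < L and row[i] == '.':
--             i += 1
--         if i == L:
--             return k == len(numbers)
--         j = i
--         while j < L and row[j] == '#':
--             j += 1
--         assert j > i
--         if k == len(numbers) or numbers[k] != j - i:
--             return False
--         i = j
--         k += 1
-- ===== Notes on version B (the rewrite author's own statement) =====
-- stated objective: alternative
-- what changed: A builds the complete list of '#'-run lengths and compares it to numbers at the end; B never builds a list: it matches numbers against the row in lockstep (skip a dot gap, measure one run, check it against numbers[k]) and returns False at the first mismatch.
import Mathlib
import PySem

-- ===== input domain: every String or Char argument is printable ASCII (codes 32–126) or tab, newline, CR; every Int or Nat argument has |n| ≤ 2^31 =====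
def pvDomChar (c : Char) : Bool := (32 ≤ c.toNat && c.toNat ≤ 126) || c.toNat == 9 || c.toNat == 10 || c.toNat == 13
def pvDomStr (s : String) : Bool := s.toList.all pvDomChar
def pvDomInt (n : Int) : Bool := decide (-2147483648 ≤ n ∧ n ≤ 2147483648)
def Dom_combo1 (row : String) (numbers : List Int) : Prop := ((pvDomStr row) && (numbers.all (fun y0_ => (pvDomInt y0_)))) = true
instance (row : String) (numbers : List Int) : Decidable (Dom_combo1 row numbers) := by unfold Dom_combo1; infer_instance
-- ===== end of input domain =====

-- B replaces A's build-the-whole-run-length-list-then-compare by a lockstep matcher: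
-- it consumes `numbers` while scanning the row (skip a dot gap, measure one '#' run,
-- check it against numbers[k]) and exits at the first mismatch; no list is built (alternative).


-- ===== PORT A =====
-- A's loop body on the state (i, hash); the `assert False` branch (never reached
-- inside Pre_) keeps the state unchanged here — in Python it raises AssertionError
-- and those rows are excluded by Pre_.
def stepA : (Int × List Int) → Char → (Int × List Int) := fun s r =>
  if r = '.' then (0, if 0 < s.1 then s.2 ++ [s.1] else s.2)
  else if r = '#' then (s.1 + 1, s.2)
  else (s.1, s.2)

def combo1 (row : String) (numbers : List Int) : Bool :=
  let st := row.toList.foldl stepA (0, [])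
  let h := if 0 < st.1 then st.2 ++ [st.1] else st.2
  if numbers == h then true else false

-- ===== PORT B =====
-- the two inner counting while-loops of B
def countDots : List Char → Nat
  | [] => 0
  | c :: cs => if c = '.' then countDots cs + 1 else 0

def countHashes : List Char → Nat
  | [] => 0
  | c :: cs => if c = '#' then countHashes cs + 1 else 0

-- B's outer `while True` loop over the cursor i and the numbers index k.
-- The `n = 0` branch is Python's failing `assert j > i` (AssertionError, outside Pre_);
-- the `none` branch of the match is an out-of-range numbers[k] (unreachable: k < len).
def combo1Go (row : List Char) (numbers : List Int) (i k : Nat) : Bool :=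
  let i' := i + countDots (row.drop i)
  if h1 : i' = row.length then decide (k = numbers.length)
  else
    let n := countHashes (row.drop i')
    if hn : n = 0 then false
    else if k = numbers.length then false
    else
      match numbers[k]? with
      | none => false
      | some m => if m ≠ (n : Int) then false else combo1Go row numbers (i' + n) (k + 1)
termination_by row.length - i
decreasing_by
  have hn' : countHashes (row.drop (i + countDots (row.drop i))) ≠ 0 := hn
  have hne : row.drop (i + countDots (row.drop i)) ≠ [] := by
    intro h; rw [h] at hn'; exact hn' rfl
  have hlt : i + countDots (row.drop i) < row.length := by
    by_contra hge
    exact hne (List.drop_eq_nil_of_le (by omega))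
  show row.length - (i + countDots (row.drop i) + countHashes (row.drop (i + countDots (row.drop i)))) < row.length - i
  omega

def combo1_alt (row : String) (numbers : List Int) : Bool :=
  combo1Go row.toList numbers 0 0

-- ===== PRECONDITION & SPEC =====
-- Pre_ excludes rows containing any character other than '.' or '#': there A raises AssertionError.
def Pre_combo1 (row : String) (numbers : List Int) : Prop :=
  (row.toList.all (fun c => c = '.' || c = '#')) = true
instance (row : String) (numbers : List Int) : Decidable (Pre_combo1 row numbers) := by
  unfold Pre_combo1; infer_instance

def pvWitness_combo1 : String × List Int := ("#.##", [1, 2])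

def Spec_combo1 (row : String) (numbers : List Int) (out : Bool) : Prop := out = combo1_alt row numbers
instance (row : String) (numbers : List Int) (out : Bool) : Decidable (Spec_combo1 row numbers out) := by unfold Spec_combo1; infer_instance

-- ===== CLAIM (what is proved, stated in full; the proofs are below) =====
def Claim_equal_combo1 : Prop := ∀ (row : String) (numbers : List Int), Dom_combo1 row numbers → Pre_combo1 row numbers → Spec_combo1 row numbers (combo1 row numbers)

-- ===== LEMMAS AND PROOFS =====

-- reference value: the '#'-run lengths of l given a pending run of length i0
def runs (i0 : Int) : List Char → List Int
  | [] => if 0 < i0 then [i0] else []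
  | c :: cs =>
    if c = '.' then (if 0 < i0 then [i0] else []) ++ runs 0 cs
    else if c = '#' then runs (i0 + 1) cs
    else runs i0 cs

-- A's fold computes `runs`
theorem combo1_fold_runs (l : List Char) : ∀ (i0 : Int) (acc : List Int),
    (if 0 < (l.foldl stepA (i0, acc)).1
     then (l.foldl stepA (i0, acc)).2 ++ [(l.foldl stepA (i0, acc)).1]
     else (l.foldl stepA (i0, acc)).2) = acc ++ runs i0 l := by
  induction l with
  | nil => intro i0 acc; simp only [List.foldl_nil, runs]; split_ifs <;> simp
  | cons c cs ih =>
    intro i0 acc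
    simp only [List.foldl_cons, runs]
    by_cases hd : c = '.'
    · rw [show stepA (i0, acc) c = (0, if 0 < i0 then acc ++ [i0] else acc) by
        simp [stepA, hd]]
      rw [ih 0 (if 0 < i0 then acc ++ [i0] else acc), if_pos hd]
      split_ifs <;> simp
    · by_cases hh : c = '#'
      · rw [show stepA (i0, acc) c = (i0 + 1, acc) by simp [stepA, hh]]
        rw [ih (i0 + 1) acc, if_neg hd, if_pos hh]
      · rw [show stepA (i0, acc) c = (i0, acc) by simp [stepA, hd, hh]]
        rw [ih i0 acc, if_neg hd, if_neg hh]

theorem countDots_le (u : List Char) : countDots u ≤ u.length := by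
  induction u with
  | nil => simp [countDots]
  | cons c cs ih => simp only [countDots, List.length_cons]; split_ifs <;> omega

theorem countHashes_le (u : List Char) : countHashes u ≤ u.length := by
  induction u with
  | nil => simp [countHashes]
  | cons c cs ih => simp only [countHashes, List.length_cons]; split_ifs <;> omega

-- leading dots do not change the runs
theorem runs_drop_countDots (u : List Char) : runs 0 u = runs 0 (u.drop (countDots u)) := by
  induction u with
  | nil => rfl
  | cons c cs ih =>
    by_cases hd : c = '.'
    · subst hd
      rw [show countDots ('.' :: cs) = countDots cs + 1 from by simp [countDots]]
      rw [show runs 0 ('.' :: cs) = runs 0 cs from by simp [runs]]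
      simpa using ih
    · rw [show countDots (c :: cs) = 0 from by simp [countDots, hd]]
      simp

theorem head_drop_countDots (u : List Char) :
    ∀ c cs, u.drop (countDots u) = c :: cs → c ≠ '.' := by
  induction u with
  | nil => intro c cs h; simp [countDots] at h
  | cons d ds ih =>
    intro c cs h
    by_cases hd : d = '.'
    · subst hd
      rw [show countDots ('.' :: ds) = countDots ds + 1 from by simp [countDots]] at h
      exact ih c cs (by simpa using h)
    · rw [show countDots (d :: ds) = 0 from by simp [countDots, hd]] at h
      simp at h
      rw [← h.1]; exact hd

theorem runs_countHashes (u : List Char) : ∀ (i0 : Int),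
    runs i0 u = runs (i0 + (countHashes u : Int)) (u.drop (countHashes u)) := by
  induction u with
  | nil => intro i0; simp [countHashes]
  | cons c cs ih =>
    intro i0
    by_cases hh : c = '#'
    · subst hh
      rw [show countHashes ('#' :: cs) = countHashes cs + 1 from by simp [countHashes]]
      rw [show runs i0 ('#' :: cs) = runs (i0 + 1) cs from by simp [runs]]
      rw [ih (i0 + 1)]
      have : i0 + 1 + (countHashes cs : Int) = i0 + ((countHashes cs + 1 : Nat) : Int) := by
        push_cast; ring
      rw [this]
      simp
    · rw [show countHashes (c :: cs) = 0 from by simp [countHashes, hh]]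
      simp

theorem head_drop_countHashes (u : List Char) :
    ∀ c cs, u.drop (countHashes u) = c :: cs → c ≠ '#' := by
  induction u with
  | nil => intro c cs h; simp [countHashes] at h
  | cons d ds ih =>
    intro c cs h
    by_cases hd : d = '#'
    · subst hd
      rw [show countHashes ('#' :: ds) = countHashes ds + 1 from by simp [countHashes]] at h
      exact ih c cs (by simpa using h)
    · rw [show countHashes (d :: ds) = 0 from by simp [countHashes, hd]] at h
      simp at h
      rw [← h.1]; exact hd

theorem runs_cons_of_pos (m : Int) (w : List Char) (hm : 0 < m)
    (hw : ∀ c cs, w = c :: cs → c = '.') : runs m w = m :: runs 0 w := by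
  cases w with
  | nil => simp [runs, hm]
  | cons c cs =>
    have hc : c = '.' := hw c cs rfl
    subst hc
    simp [runs, hm]

-- B's loop invariant: combo1Go compares the remaining numbers with the remaining runs
theorem go_eq (row : List Char) (numbers : List Int) :
    ∀ (fuel i k : Nat), row.length - i ≤ fuel →
    (∀ c ∈ row, c = '.' ∨ c = '#') → i ≤ row.length → k ≤ numbers.length →
    combo1Go row numbers i k = (numbers.drop k == runs 0 (row.drop i)) := by
  intro fuel
  induction fuel with
  | zero =>
    intro i k hf hv hi hk
    -- row.drop i = [] here
    have hdrop : row.drop i = [] := List.drop_eq_nil_of_le (by omega)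
    have hi' : i = row.length := by omega
    rw [combo1Go.eq_def]
    have hcd : countDots (row.drop i) = 0 := by rw [hdrop]; rfl
    rw [dif_pos (by rw [hcd]; omega)]
    rw [hdrop]
    show decide (k = numbers.length) = (numbers.drop k == runs 0 [])
    by_cases hke : k = numbers.length
    · simp [hke, runs]
    · have : numbers.drop k ≠ [] := by
        rw [Ne, List.drop_eq_nil_iff]; omega
      rcases List.exists_cons_of_ne_nil this with ⟨a, as, ha⟩
      simp [hke, ha, runs]
  | succ f ih =>
    intro i k hf hv hi hk
    rw [combo1Go.eq_def]
    have hdd : row.drop (i + countDots (row.drop i))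
        = (row.drop i).drop (countDots (row.drop i)) := by
      rw [List.drop_drop]
    have hruns1 : runs 0 (row.drop i) = runs 0 (row.drop (i + countDots (row.drop i))) := by
      rw [hdd]; exact runs_drop_countDots (row.drop i)
    set i' := i + countDots (row.drop i) with hi'def
    by_cases h1 : i' = row.length
    · rw [dif_pos h1]
      have hdrop : row.drop i' = [] := List.drop_eq_nil_of_le (by omega)
      rw [hruns1, hdrop]
      by_cases hke : k = numbers.length
      · simp [hke, runs]
      · have : numbers.drop k ≠ [] := by rw [Ne, List.drop_eq_nil_iff]; omega
        rcases List.exists_cons_of_ne_nil this with ⟨a, as, ha⟩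
        simp [hke, ha, runs]
    · rw [dif_neg h1]
      have hile : i' ≤ row.length := by
        have := countDots_le (row.drop i)
        simp only [List.length_drop] at this
        omega
      have hlt : i' < row.length := by omega
      have hvne : row.drop i' ≠ [] := by rw [Ne, List.drop_eq_nil_iff]; omega
      rcases List.exists_cons_of_ne_nil hvne with ⟨c, cs, hc⟩
      have hcdot : c ≠ '.' := by
        apply head_drop_countDots (row.drop i) c cs
        rw [← hdd]; exact hc
      have hcmem : c ∈ row := by
        have hmem : c ∈ row.drop i' := by rw [hc]; simp
        exact List.mem_of_mem_drop hmem
      have hchash : c = '#' := (hv c hcmem).resolve_left hcdot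
      have hnpos : 0 < countHashes (row.drop i') := by
        rw [hc, hchash]; simp [countHashes]
      set n := countHashes (row.drop i') with hndef
      rw [dif_neg (by omega)]
      -- runs of the suffix start with the run n
      have hdd2 : (row.drop i').drop n = row.drop (i' + n) := by
        rw [List.drop_drop]
      have hwhead : ∀ c' cs', row.drop (i' + n) = c' :: cs' → c' = '.' := by
        intro c' cs' h'
        have hne : c' ≠ '#' := head_drop_countHashes (row.drop i') c' cs' (by rw [hdd2]; exact h')
        have hmem2 : c' ∈ row := by
          have hmem : c' ∈ row.drop (i' + n) := by rw [h']; simp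
          exact List.mem_of_mem_drop hmem
        exact (hv c' hmem2).resolve_right hne
      have hruns2 : runs 0 (row.drop i') = (n : Int) :: runs 0 (row.drop (i' + n)) := by
        have := runs_countHashes (row.drop i') 0
        rw [← hndef, hdd2] at this
        rw [this]
        simp only [zero_add]
        exact runs_cons_of_pos (n : Int) _ (by exact_mod_cast hnpos) hwhead
      rw [hruns1, hruns2]
      by_cases hke : k = numbers.length
      · rw [if_pos hke]
        have : numbers.drop k = [] := List.drop_eq_nil_of_le (by omega)
        simp [this]
      · rw [if_neg hke]
        have hklt : k < numbers.length := by omega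
        have hget : numbers[k]? = some numbers[k] := List.getElem?_eq_getElem hklt
        rw [hget]
        have hdropk : numbers.drop k = numbers[k] :: numbers.drop (k + 1) :=
          List.drop_eq_getElem_cons hklt
        by_cases hm : numbers[k] = (n : Int)
        · simp only [hm, ne_eq, not_true_eq_false, if_false]
          have hnle : n ≤ row.length - i' := by
            have := countHashes_le (row.drop i')
            simp only [List.length_drop] at this
            omega
          rw [ih (i' + n) (k + 1) (by omega) hv (by omega) (by omega)]
          rw [hdropk, hm]
          simp
        · have hfalse : (List.drop k numbers == ((n : Int) :: runs 0 (row.drop (i' + n)))) = false := by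
            rw [hdropk, List.cons_beq_cons]
            simp [hm]
          rw [hfalse]
          simp [hm]

theorem runs_eq (row : String) (numbers : List Int) (hpre : Pre_combo1 row numbers) :
    combo1 row numbers = combo1_alt row numbers := by
  have hv : ∀ c ∈ row.toList, c = '.' ∨ c = '#' := by
    unfold Pre_combo1 at hpre
    intro c hc
    have := (List.all_eq_true.mp hpre) c hc
    simpa using this
  have hA := combo1_fold_runs row.toList 0 []
  have hB := go_eq row.toList numbers row.toList.length 0 0 (by omega) hv (by omega) (by omega)
  show (if numbers == (if 0 < (row.toList.foldl stepA (0, [])).1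
          then (row.toList.foldl stepA (0, [])).2 ++ [(row.toList.foldl stepA (0, [])).1]
          else (row.toList.foldl stepA (0, [])).2)
        then true else false)
      = combo1Go row.toList numbers 0 0
  rw [hA, hB]
  simp only [List.drop_zero, List.nil_append]
  rcases Bool.eq_false_or_eq_true (numbers == runs 0 row.toList) with h | h <;> simp [h]

-- ===== VERDICT (by name: the statement is the Claim_ definition above) =====
theorem combo1_spec : Claim_equal_combo1 := by
  intro row numbers _ hpre
  exact runs_eq row numbers hpre
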